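-- pv_equiv track=rewrite | github.com/daniel-reich/ubiquitous-fiesta | yyCGJKP442qtTD9Ek_4.py | sums_of_powers_of_two
-- ===== SOURCE A (Python) =====
-- def sums_of_powers_of_two(n):
--   p2=[2**i for i in range(30)]
--   l=[]
--   while n>0:
--     m=min(p2,key=lambda x:n-x if x<=n else 2**29)
--     l.append(m)
--     n-=m
--   return sorted(l)
-- ===== SOURCE B (Python) =====
-- def sums_of_powers_of_two(n):
--   out = []
--   for i in range(29, -1, -1):
--     p = 1 << i
--     while n >= p:
--       out.append(p)
--       n -= p
--   out.reverse()
--   return out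
-- ===== Notes on version B (the rewrite author's own statement) =====
-- stated objective: alternative
-- what changed: Replaces the per-term min-scan over the whole power table plus a final sort by a single descending pass over the exponents with an inner subtract-while loop, building the result and reversing it.
import Mathlib
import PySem

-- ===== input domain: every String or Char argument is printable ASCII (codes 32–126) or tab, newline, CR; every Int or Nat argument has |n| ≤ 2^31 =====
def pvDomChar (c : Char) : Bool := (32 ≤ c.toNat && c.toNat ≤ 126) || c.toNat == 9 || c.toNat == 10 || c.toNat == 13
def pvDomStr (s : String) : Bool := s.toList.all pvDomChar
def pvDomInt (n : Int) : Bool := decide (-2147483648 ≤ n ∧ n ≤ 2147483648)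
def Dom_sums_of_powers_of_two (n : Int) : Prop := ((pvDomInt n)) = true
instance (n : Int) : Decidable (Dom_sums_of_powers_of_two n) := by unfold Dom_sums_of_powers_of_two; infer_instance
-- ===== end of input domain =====

-- B replaces A's per-term min-scan over the power table (plus a final sort) by one
-- descending pass over the exponents with an inner subtract-while loop; same values.

-- ===== PORT A =====
-- p2 = [2**i for i in range(30)]
def pvP2 : List Int := (List.range 30).map (fun i => (2:Int)^i)

-- termination helper for the while loop: every element of p2 is ≥ 1 (cited by decreasing_by)
theorem pvP2_pos : ∀ m ∈ pvP2, 1 ≤ m := by decide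

-- while n>0: m=min(p2,key=...); l.append(m); n-=m
def pvLoopA (n : Int) (l : List Int) : List Int :=
  if hn : 0 < n then
    match hm : PySem.List.min? pvP2 (fun x => if x ≤ n then n - x else 2^29) with
    | some m => pvLoopA (n - m) (l ++ [m])
    | none => l    -- unreachable: p2 is non-empty (Python min would raise only on an empty list)
  else l
termination_by n.toNat
decreasing_by
  have h1 : 1 ≤ m := pvP2_pos m (PySem.List.min?_mem hm)
  omega

def sums_of_powers_of_two (n : Int) : List Int :=
  PySem.List.sorted (pvLoopA n []) (fun x => x)

-- ===== PORT B =====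
-- while n >= p: out.append(p); n -= p     (p = 1 << i = 2^i)
def pvInner (i : Nat) (n : Int) (acc : List Int) : Int × List Int :=
  if (2:Int)^i ≤ n then pvInner i (n - 2^i) (acc ++ [(2:Int)^i]) else (n, acc)
termination_by n.toNat
decreasing_by
  have h1 : (1:Int) ≤ 2^i := one_le_pow₀ (by norm_num)
  omega

-- for i in range(29, -1, -1): …   (j counts the remaining exponents: i = j-1 down to 0)
def pvOuter (j : Nat) (n : Int) (acc : List Int) : List Int :=
  match j with
  | 0 => acc
  | j+1 => pvOuter j (pvInner j n acc).1 (pvInner j n acc).2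

def sums_of_powers_of_two_alt (n : Int) : List Int :=
  (pvOuter 30 n []).reverse

-- ===== PRECONDITION & SPEC =====
def Spec_sums_of_powers_of_two (n : Int) (out : List Int) : Prop := out = sums_of_powers_of_two_alt n
instance (n : Int) (out : List Int) : Decidable (Spec_sums_of_powers_of_two n out) := by unfold Spec_sums_of_powers_of_two; infer_instance

-- ===== CLAIM (what is proved, stated in full; the proofs are below) =====
def Claim_equal_sums_of_powers_of_two : Prop := ∀ (n : Int), Dom_sums_of_powers_of_two n → Spec_sums_of_powers_of_two n (sums_of_powers_of_two n)

-- ===== LEMMAS AND PROOFS =====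

-- Python's min with key returns the unique strict minimiser when there is one.
theorem pv_foldl_min_aux {α : Type} (key : α → Int) (m : α) :
    ∀ (t : List α) (b : α),
      (b = m ∨ (m ∈ t ∧ key m < key b)) →
      (∀ x ∈ t, x ≠ m → key m < key x) →
      List.foldl (fun acc x => match acc with
        | none => some x
        | some mm => if key x < key mm then some x else some mm) (some b) t = some m := by
  intro t
  induction t with
  | nil =>
    intro b hb _
    rcases hb with rfl | ⟨h, _⟩
    · rfl
    · cases h
  | cons c t' ih =>
    intro b hb h
    simp only [List.foldl_cons]
    rcases hb with hbm | ⟨hm, hlt⟩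
    · -- b = m : no element can beat m
      have hnc : ¬ key c < key b := by
        rw [hbm]
        by_cases hc : c = m
        · subst hc; exact lt_irrefl _
        · exact not_lt_of_ge (le_of_lt (h c (List.mem_cons_self) hc))
      rw [if_neg hnc]
      exact ih b (Or.inl hbm) (fun x hx => h x (List.mem_cons_of_mem _ hx))
    · by_cases hc : c = m
      · subst hc
        simp only [if_pos hlt]
        exact ih c (Or.inl rfl) (fun x hx => h x (List.mem_cons_of_mem _ hx))
      · have hmc : key m < key c := h c (List.mem_cons_self) hc
        have hmt : m ∈ t' := by
          rcases List.mem_cons.mp hm with rfl | hm'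
          · exact absurd rfl hc
          · exact hm'
        by_cases hcb : key c < key b
        · simp only [if_pos hcb]
          exact ih c (Or.inr ⟨hmt, hmc⟩) (fun x hx => h x (List.mem_cons_of_mem _ hx))
        · simp only [if_neg hcb]
          exact ih b (Or.inr ⟨hmt, hlt⟩) (fun x hx => h x (List.mem_cons_of_mem _ hx))

theorem pv_min?_eq_of_strict {α : Type} (key : α → Int) (xs : List α) (m : α)
    (hm : m ∈ xs) (h : ∀ x ∈ xs, x ≠ m → key m < key x) :
    PySem.List.min? xs key = some m := by
  cases xs with
  | nil => cases hm
  | cons a t =>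
    show List.foldl _ (some a) t = some m
    by_cases ha : a = m
    · exact pv_foldl_min_aux key m t a (Or.inl ha)
        (fun x hx => h x (List.mem_cons_of_mem _ hx))
    · have hmt : m ∈ t := by
        rcases List.mem_cons.mp hm with rfl | hm'
        · exact absurd rfl ha
        · exact hm'
      exact pv_foldl_min_aux key m t a
        (Or.inr ⟨hmt, h a (List.mem_cons_self) ha⟩)
        (fun x hx => h x (List.mem_cons_of_mem _ hx))

theorem pv_mem_p2 {x : Int} (hx : x ∈ pvP2) : ∃ i : Nat, i < 30 ∧ x = 2^i := by
  rcases List.mem_map.mp hx with ⟨i, hi, rfl⟩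
  exact ⟨i, List.mem_range.mp hi, rfl⟩

theorem pv_p2_mem {i : Nat} (hi : i < 30) : (2:Int)^i ∈ pvP2 :=
  List.mem_map.mpr ⟨i, List.mem_range.mpr hi, rfl⟩

-- when 2^j ≤ n and (n < 2^(j+1) or j = 29), A's min-pick is exactly 2^j
theorem pv_minpick {j : Nat} (hj : j < 30) {n : Int}
    (hl : (2:Int)^j ≤ n) (hu : n < 2^(j+1) ∨ j = 29) :
    PySem.List.min? pvP2 (fun x => if x ≤ n then n - x else 2^29) = some ((2:Int)^j) := by
  apply pv_min?_eq_of_strict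
  · exact pv_p2_mem hj
  · intro x hx hne
    rcases pv_mem_p2 hx with ⟨i, hi, rfl⟩
    have hij : i ≠ j := by rintro rfl; exact hne rfl
    simp only [if_pos hl]
    by_cases hxi : (2:Int)^i ≤ n
    · -- need i < j
      have hiltj : i < j := by
        rcases hu with hu | rfl
        · have : (2:Int)^i < 2^(j+1) := lt_of_le_of_lt hxi hu
          have := (pow_lt_pow_iff_right₀ (by norm_num : (1:Int) < 2)).mp this
          omega
        · omega
      have : (2:Int)^i < 2^j := (pow_lt_pow_iff_right₀ (by norm_num : (1:Int) < 2)).mpr hiltj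
      simp only [if_pos hxi]
      omega
    · -- x > n : need n - 2^j < 2^29
      simp only [if_neg hxi]
      rcases hu with hu | rfl
      · have hle : (2:Int)^j ≤ 2^29 :=
          pow_le_pow_right₀ (by norm_num : (1:Int) ≤ 2) (by omega)
        have : n - 2^j < 2^j := by
          have : (2:Int)^(j+1) = 2^j * 2 := by ring
          omega
        omega
      · exfalso
        have : (2:Int)^i ≤ 2^29 :=
          pow_le_pow_right₀ (by norm_num : (1:Int) ≤ 2) (by omega)
        exact hxi (le_trans this hl)

theorem pv_inner_fst_lt (i : Nat) (n : Int) (acc : List Int) :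
    (pvInner i n acc).1 < 2^i := by
  fun_induction pvInner with
  | case1 n acc h ih => exact ih
  | case2 n acc h => exact lt_of_not_ge h

-- A's loop performs exactly B's inner while-loop steps at exponent j
theorem pv_loopA_inner (j : Nat) (hj : j < 30) :
    ∀ (n : Int) (acc : List Int), (n < 2^(j+1) ∨ j = 29) →
      pvLoopA n acc = pvLoopA (pvInner j n acc).1 (pvInner j n acc).2 := by
  intro n
  induction hn : n.toNat using Nat.strong_induction_on generalizing n with
  | _ k ih =>
  intro acc hu
  rw [pvInner]
  by_cases hle : (2:Int)^j ≤ n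
  · simp only [if_pos hle]
    have hpos : 0 < n := lt_of_lt_of_le (by positivity) hle
    have hpow : (1:Int) ≤ 2^j := one_le_pow₀ (by norm_num)
    rw [pvLoopA, dif_pos hpos]
    have hmin := pv_minpick hj hle hu
    have hrec := ih (n - 2^j).toNat (by omega) (n - 2^j) rfl (acc ++ [(2:Int)^j])
      (by rcases hu with hu | rfl
          · left; omega
          · right; rfl)
    split
    · next m hm2 =>
      rw [hmin] at hm2
      injection hm2 with hm2
      rw [← hm2]
      exact hrec
    · next hm2 => rw [hmin] at hm2; cases hm2
  · simp only [if_neg hle]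

theorem pv_main (j : Nat) (hj : j ≤ 30) :
    ∀ (n : Int) (acc : List Int), (n < 2^j ∨ j = 30) →
      pvLoopA n acc = pvOuter j n acc := by
  induction j with
  | zero =>
    intro n acc h
    have hn : ¬ 0 < n := by
      rcases h with h | h
      · simp at h; omega
      · exact absurd h (by norm_num)
    rw [pvLoopA, dif_neg hn]; rfl
  | succ j ihj =>
    intro n acc h
    have hj' : j < 30 := by omega
    have h1 : n < 2^(j+1) ∨ j = 29 := by
      rcases h with h | h
      · exact Or.inl h
      · right; omega
    rw [pv_loopA_inner j hj' n acc h1]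
    show _ = pvOuter j (pvInner j n acc).1 (pvInner j n acc).2
    exact ihj (by omega) _ _ (Or.inl (pv_inner_fst_lt j n acc))

theorem pv_inner_sorted (i : Nat) (n : Int) (acc : List Int)
    (hge : ∀ a ∈ acc, (2:Int)^i ≤ a) (hp : acc.Pairwise (· ≥ ·)) :
    (∀ a ∈ (pvInner i n acc).2, (2:Int)^i ≤ a) ∧ (pvInner i n acc).2.Pairwise (· ≥ ·) := by
  fun_induction pvInner with
  | case1 n acc h ih =>
    apply ih
    · intro a ha
      rcases List.mem_append.mp ha with ha | ha
      · exact hge a ha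
      · simp at ha; omega
    · rw [List.pairwise_append]
      refine ⟨hp, by simp, ?_⟩
      intro a ha b hb
      simp at hb; subst hb
      exact hge a ha
  | case2 n acc h => exact ⟨hge, hp⟩

theorem pv_outer_sorted (j : Nat) :
    ∀ (n : Int) (acc : List Int), (∀ a ∈ acc, (2:Int)^j ≤ a) → acc.Pairwise (· ≥ ·) →
      (pvOuter j n acc).Pairwise (· ≥ ·) := by
  induction j with
  | zero => intro n acc _ hp; exact hp
  | succ j ihj =>
    intro n acc hge hp
    have hge' : ∀ a ∈ acc, (2:Int)^j ≤ a := fun a ha =>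
      le_trans (pow_le_pow_right₀ (by norm_num : (1:Int) ≤ 2) (by omega)) (hge a ha)
    obtain ⟨h1, h2⟩ := pv_inner_sorted j n acc hge' hp
    exact ihj _ _ h1 h2

-- ===== VERDICT (by name: the statement is the Claim_ definition above) =====
theorem sums_of_powers_of_two_spec : Claim_equal_sums_of_powers_of_two := by
  intro n _
  show PySem.List.sorted (pvLoopA n []) (fun x => x) = (pvOuter 30 n []).reverse
  rw [pv_main 30 le_rfl n [] (Or.inr rfl)]
  have hsorted : (pvOuter 30 n []).Pairwise (· ≥ ·) :=
    pv_outer_sorted 30 n [] (by simp) (by simp)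
  apply List.Perm.eq_of_pairwise
    (le := fun a b : Int => a ≤ b)
    (fun a b _ _ hab hba => le_antisymm hab hba)
  · simpa using PySem.List.sorted_pairwise (pvOuter 30 n []) (fun x => x)
  · exact (List.pairwise_reverse).mpr (by simpa using hsorted)
  · exact (PySem.List.sorted_perm _ _ _).trans (pvOuter 30 n []).reverse_perm.symm
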